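-- pv_equiv track=rewrite | github.com/saba1109/GOA-group40-2- | day 86/homework/homework5.py | process_lists
-- ===== SOURCE A (Python) =====
-- def process_lists(list1, list2):
--     even_numbers = []
--     for number in list1:
--         if number % 2 == 0:
--             even_numbers.append(number)
--
--     odd_numbers = []
--     for number in list2:
--         if number % 2 != 0:
--             odd_numbers.append(number)
--
--     merged = even_numbers + odd_numbers
--
--     total = 0
--     for i in range(len(merged)):
--         if i % 2 != 0:
--             total += merged[i]
--
--     return total
-- ===== SOURCE B (Python) =====
-- def process_lists(list1, list2):
--     # One streaming pass: no even/odd lists, no merged list, no index arithmetic.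
--     # odd_slot is True exactly when the next kept element would land at an odd
--     # index of the merged list A builds.
--     total = 0
--     odd_slot = False
--     for n in list1:
--         if n % 2 == 0:
--             if odd_slot:
--                 total += n
--             odd_slot = not odd_slot
--     for n in list2:
--         if n % 2 != 0:
--             if odd_slot:
--                 total += n
--             odd_slot = not odd_slot
--     return total
-- ===== Notes on version B (the rewrite author's own statement) =====
-- stated objective: alternative
-- what changed: B replaces A's three passes (filter evens, filter odds, concatenate, then scan odd indices of the merged list) with one streaming pass over each input keeping only a running total and a parity flag, building no intermediate lists.
import Mathlib
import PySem

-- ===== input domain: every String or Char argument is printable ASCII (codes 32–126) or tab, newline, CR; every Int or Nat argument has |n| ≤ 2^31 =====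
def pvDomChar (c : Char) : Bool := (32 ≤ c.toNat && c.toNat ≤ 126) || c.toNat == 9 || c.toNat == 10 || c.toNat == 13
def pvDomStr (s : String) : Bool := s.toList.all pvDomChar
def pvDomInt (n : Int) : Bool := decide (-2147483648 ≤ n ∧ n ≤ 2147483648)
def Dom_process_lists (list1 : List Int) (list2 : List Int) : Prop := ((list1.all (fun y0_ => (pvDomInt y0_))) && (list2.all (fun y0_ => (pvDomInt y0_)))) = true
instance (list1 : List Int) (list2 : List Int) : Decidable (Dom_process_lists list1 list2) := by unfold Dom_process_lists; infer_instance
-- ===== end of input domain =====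

-- B replaces A's filter-concatenate-index-scan with one streaming pass keeping a
-- running total and a parity flag (no intermediate lists); objective: alternative/simpler.

-- ===== PORT A =====
-- pyGetD merged i 0 is exact here: every i produced by range(len(merged)) is in range.
def process_lists (list1 : List Int) (list2 : List Int) : Int :=
  let even_numbers := list1.foldl (fun acc number => if PySem.Int.mod number 2 == 0 then acc ++ [number] else acc) []
  let odd_numbers := list2.foldl (fun acc number => if PySem.Int.mod number 2 != 0 then acc ++ [number] else acc) []
  let merged := even_numbers ++ odd_numbers
  (PySem.List.pyRange 0 (merged.length : Int) 1).foldl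
    (fun total i => if PySem.Int.mod i 2 != 0 then total + PySem.List.pyGetD merged i 0 else total) 0

-- ===== PORT B =====
def process_lists_alt (list1 : List Int) (list2 : List Int) : Int :=
  let st := list1.foldl
    (fun (st : Int × Bool) n =>
      if PySem.Int.mod n 2 == 0 then ((if st.2 then st.1 + n else st.1), !st.2) else st)
    (0, false)
  let st := list2.foldl
    (fun (st : Int × Bool) n =>
      if PySem.Int.mod n 2 != 0 then ((if st.2 then st.1 + n else st.1), !st.2) else st)
    st
  st.1

-- ===== PRECONDITION & SPEC =====
def Spec_process_lists (list1 : List Int) (list2 : List Int) (out : Int) : Prop := out = process_lists_alt list1 list2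
instance (list1 : List Int) (list2 : List Int) (out : Int) : Decidable (Spec_process_lists list1 list2 out) := by unfold Spec_process_lists; infer_instance

-- ===== CLAIM (what is proved, stated in full; the proofs are below) =====
def Claim_equal_process_lists : Prop := ∀ (list1 : List Int) (list2 : List Int), Dom_process_lists list1 list2 → Spec_process_lists list1 list2 (process_lists list1 list2)

-- ===== LEMMAS AND PROOFS =====

-- sum of the elements at odd (flag = false) / even (flag = true) positions
def pSum : Bool → List Int → Int
  | _, [] => 0
  | false, _ :: xs => pSum true xs
  | true, x :: xs => x + pSum false xs

lemma succ_mod_two (n : Nat) : (((n + 1) % 2 == 1)) = !(n % 2 == 1) := by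
  rcases Nat.mod_two_eq_zero_or_one n with h | h <;> simp [Nat.add_mod, h]

lemma foldl_append_filter (p : Int → Bool) :
    ∀ (l acc : List Int),
      l.foldl (fun acc n => if p n then acc ++ [n] else acc) acc = acc ++ l.filter p
  | [], acc => by simp
  | x :: l, acc => by
    by_cases h : p x <;> simp [List.foldl_cons, h, foldl_append_filter p l]

lemma pSum_append :
    ∀ (a b : List Int) (f : Bool),
      pSum f (a ++ b) = pSum f a + pSum (xor f (a.length % 2 == 1)) b
  | [], b, f => by cases f <;> simp [pSum]
  | x :: a, b, f => by
    cases f <;>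
      simp [pSum, pSum_append a b, succ_mod_two, Bool.not_not, add_assoc]

lemma toggle_foldl :
    ∀ (l : List Int) (t : Int) (f : Bool),
      l.foldl (fun (st : Int × Bool) n => ((if st.2 then st.1 + n else st.1), !st.2)) (t, f)
        = (t + pSum f l, xor f (l.length % 2 == 1))
  | [], t, f => by cases f <;> simp [pSum]
  | x :: l, t, f => by
    cases f <;>
      simp [List.foldl_cons, toggle_foldl l, pSum, succ_mod_two, Bool.not_not, add_assoc]

lemma mod_two_cast (s : Nat) : PySem.Int.mod (s : Int) 2 = ((s % 2 : Nat) : Int) := by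
  rw [PySem.Int.mod_eq_emod_of_pos (show (0:Int) < 2 by norm_num)]
  omega

lemma enum_foldl :
    ∀ (l : List Int) (s : Nat) (t : Int),
      (PySem.List.enumerate l (s : Int)).foldl
          (fun t p => if PySem.Int.mod p.1 2 != 0 then t + p.2 else t) t
        = t + pSum (s % 2 == 1) l
  | [], s, t => by simp [PySem.List.enumerate_nil, pSum]
  | x :: l, s, t => by
    rw [PySem.List.enumerate_cons]
    have hcast : ((s : Int) + 1) = ((s + 1 : Nat) : Int) := by push_cast; ring
    have hmod := mod_two_cast s
    rcases Nat.mod_two_eq_zero_or_one s with hs | hs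
    · have hs1 : (s + 1) % 2 = 1 := by omega
      simp only [List.foldl_cons, hmod, hs, hcast]
      rw [enum_foldl l (s + 1)]
      simp [hs1, pSum]
    · have hs1 : (s + 1) % 2 = 0 := by omega
      simp only [List.foldl_cons, hmod, hs, hcast]
      rw [enum_foldl l (s + 1)]
      simp [hs1, pSum, add_assoc]

lemma loopA (l : List Int) :
    (PySem.List.pyRange 0 (l.length : Int) 1).foldl
        (fun total i => if PySem.Int.mod i 2 != 0 then total + PySem.List.pyGetD l i 0 else total) 0
      = pSum false l := by
  have he := PySem.List.enumerate_eq_map_pyRange (xs := l) (d := 0)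
  simp only [PySem.List.len_eq] at he
  rw [show (PySem.List.pyRange 0 (l.length : Int) 1).foldl
        (fun total i => if PySem.Int.mod i 2 != 0 then total + PySem.List.pyGetD l i 0 else total) 0
      = ((PySem.List.pyRange 0 (l.length : Int) 1).map
          (fun j => (j, PySem.List.pyGetD l j 0))).foldl
          (fun t (p : Int × Int) => if PySem.Int.mod p.1 2 != 0 then t + p.2 else t) 0
    from (List.foldl_map (f := fun j => (j, PySem.List.pyGetD l j 0))
          (g := fun t (p : Int × Int) => if PySem.Int.mod p.1 2 != 0 then t + p.2 else t)).symm]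
  rw [← he]
  simpa using enum_foldl l 0 0

-- ===== VERDICT (by name: the statement is the Claim_ definition above) =====
theorem process_lists_spec : Claim_equal_process_lists := by
  intro list1 list2 _
  unfold Spec_process_lists process_lists process_lists_alt
  simp only [foldl_append_filter, List.nil_append]
  rw [loopA, pSum_append]
  simp only [PySem.List.foldl_if_eq_foldl_filter, toggle_foldl]
  simp
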